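-- pv_equiv track=rewrite | github.com/decoct-io/decoct | src/decoct/adapters/iosxr.py | _get_section_key
-- ===== SOURCE A (Python) =====
-- SECTION_KEYWORDS: dict[str, str | int] = {
--     "router": 2,            # router isis CORE -> router.isis.CORE
--     "interface": 1,         # interface Loopback0
--     "neighbor": 1,          # neighbor 10.0.0.11
--     "address-family": "all",  # address-family ipv4 unicast -> address-family.ipv4-unicast
--     "vrf": 1,
--     "evi": 1,
--     "bridge-domain": 1,
--     "bridge group": 1,      # pseudo-section (two-word keyword)
--     "route-policy": 1,
--     "policy-map": 1,
--     "dynamic-template": "all",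
-- }
--
-- TWO_WORD_SECTIONS = {"bridge group"}
--
-- def _get_section_key(keyword: str, args: list[str]) -> tuple[str, list[str]]:
--     """Determine if a keyword is a section and compute its path segment.
--
--     Returns (path_segment, remaining_args) or ("", args) if not a section.
--     """
--     # Check two-word sections first
--     for tw in TWO_WORD_SECTIONS:
--         parts = tw.split()
--         if keyword == parts[0] and args and args[0] == parts[1]:
--             spec = SECTION_KEYWORDS[tw]
--             remaining = args[1:]
--             if spec == "all":
--                 segment = tw.replace(" ", "-") + "." + "-".join(remaining)
--                 return segment, []
--             n = int(spec)
--             consumed = remaining[:n]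
--             rest = remaining[n:]
--             segment = tw.replace(" ", "-") + "." + ".".join(consumed) if consumed else tw.replace(" ", "-")
--             return segment, rest
--
--     if keyword in SECTION_KEYWORDS:
--         spec = SECTION_KEYWORDS[keyword]
--         if spec == "all":
--             segment = keyword + "." + "-".join(args) if args else keyword
--             return segment, []
--         n = int(spec)
--         consumed = args[:n]
--         rest = args[n:]
--         segment = keyword + "." + ".".join(consumed) if consumed else keyword
--         return segment, rest
--
--     return "", args
-- ===== SOURCE B (Python) =====
-- SECTION_KEYWORDS: dict[str, str | int] = {
--     "router": 2,
--     "interface": 1,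
--     "neighbor": 1,
--     "address-family": "all",
--     "vrf": 1,
--     "evi": 1,
--     "bridge-domain": 1,
--     "bridge group": 1,
--     "route-policy": 1,
--     "policy-map": 1,
--     "dynamic-template": "all",
-- }
--
-- TWO_WORD_SECTIONS = {"bridge group"}
--
--
-- def _get_section_key(keyword: str, args: list[str]) -> tuple[str, list[str]]:
--     """Longest-match over the uniform token stream [keyword] + args:
--     try the two-token name, then the one-token name, against the one table;
--     no separate two-word-section pass exists."""
--     tokens = [keyword] + args
--     for k in (2, 1):
--         if len(tokens) >= k and " ".join(tokens[:k]) in SECTION_KEYWORDS: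
--             spec = SECTION_KEYWORDS[" ".join(tokens[:k])]
--             prefix = "-".join(tokens[:k])
--             rest = tokens[k:]
--             if spec == "all":
--                 return ((prefix + "." + "-".join(rest)) if rest else prefix), []
--             return ((prefix + "." + ".".join(rest[:spec])) if rest[:spec] else prefix), rest[spec:]
--     return "", args
-- ===== Notes on version B (the rewrite author's own statement) =====
-- stated objective: alternative
-- what changed: A's special two-word-section pass (loop over TWO_WORD_SECTIONS with split/replace plus a separate single-keyword dict branch) is replaced by a single longest-match lookup over the uniform token stream [keyword]+args: the two-token then the one-token name is tried against the one table and one shared builder emits the segment.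
import Mathlib
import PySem

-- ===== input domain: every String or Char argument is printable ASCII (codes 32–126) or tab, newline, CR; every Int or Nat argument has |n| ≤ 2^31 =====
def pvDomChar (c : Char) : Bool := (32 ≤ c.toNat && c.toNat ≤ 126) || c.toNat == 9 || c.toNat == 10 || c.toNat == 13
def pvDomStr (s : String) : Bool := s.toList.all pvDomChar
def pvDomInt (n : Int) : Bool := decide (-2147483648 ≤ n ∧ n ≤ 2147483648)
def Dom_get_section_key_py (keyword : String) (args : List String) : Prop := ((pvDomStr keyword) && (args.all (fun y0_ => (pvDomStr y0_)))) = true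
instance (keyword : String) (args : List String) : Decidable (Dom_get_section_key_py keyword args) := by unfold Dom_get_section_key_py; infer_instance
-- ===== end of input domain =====

-- B replaces A's separate two-word-section pass by one longest-match lookup over the token stream [keyword]+args (alternative decomposition, same cost).

-- The dict value type str | int
inductive SpecV
  | all
  | num : Int → SpecV
deriving DecidableEq, Repr

-- shared module-level constants (used by both ports)
def sectionKeywords : PySem.Dict String SpecV :=
  PySem.Dict.ofList [("router", .num 2), ("interface", .num 1), ("neighbor", .num 1),
    ("address-family", .all), ("vrf", .num 1), ("evi", .num 1), ("bridge-domain", .num 1),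
    ("bridge group", .num 1), ("route-policy", .num 1), ("policy-map", .num 1),
    ("dynamic-template", .all)]

def twoWordSections : List String := ["bridge group"]

-- ===== PORT A =====
-- the 'for tw in TWO_WORD_SECTIONS' loop (early return = some); parts[0]/parts[1] via getD "" and
-- SECTION_KEYWORDS[tw] via getD are exact here: every tw in the literal set splits into two words and is a dict key
def twoWordLoopA (keyword : String) (args : List String) : List String → Option (String × List String)
  | [] => none
  | tw :: tws =>
    let parts := PySem.Str.split₀ tw
    if keyword = parts.getD 0 "" ∧ args ≠ [] ∧ args.getD 0 "" = parts.getD 1 "" then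
      let remaining := PySem.List.slice args (some 1) none
      match (sectionKeywords.get? tw).getD (.num 0) with
      | .all =>
          some (PySem.Str.replace tw " " "-" ++ "." ++ PySem.Str.join "-" remaining, [])
      | .num n =>
          let consumed := PySem.List.slice remaining none (some n)
          let rest := PySem.List.slice remaining (some n) none
          some ((if consumed ≠ [] then PySem.Str.replace tw " " "-" ++ "." ++ PySem.Str.join "." consumed
                 else PySem.Str.replace tw " " "-"), rest)
    else twoWordLoopA keyword args tws

def get_section_key_py (keyword : String) (args : List String) : String × List String :=
  match twoWordLoopA keyword args twoWordSections with
  | some r => r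
  | none =>
    match sectionKeywords.get? keyword with
    | some spec =>
      match spec with
      | .all => ((if args ≠ [] then keyword ++ "." ++ PySem.Str.join "-" args else keyword), [])
      | .num n =>
        let consumed := PySem.List.slice args none (some n)
        let rest := PySem.List.slice args (some n) none
        ((if consumed ≠ [] then keyword ++ "." ++ PySem.Str.join "." consumed else keyword), rest)
    | none => ("", args)

-- ===== PORT B =====
-- Source B's 'for k in (2, 1)' loop over the token stream; '" ".join(tokens[:k]) in SECTION_KEYWORDS'
-- plus the subsequent subscript is the match on get?
def tryLenB (tokens : List String) : List Int → Option (String × List String)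
  | [] => none
  | k :: ks =>
    if k ≤ (tokens.length : Int) then
      match sectionKeywords.get? (PySem.Str.join " " (PySem.List.slice tokens none (some k))) with
      | some spec =>
        let pfx := PySem.Str.join "-" (PySem.List.slice tokens none (some k))
        let rest := PySem.List.slice tokens (some k) none
        match spec with
        | .all =>
            some ((if rest ≠ [] then pfx ++ "." ++ PySem.Str.join "-" rest else pfx), [])
        | .num n =>
            some ((if PySem.List.slice rest none (some n) ≠ [] then
                     pfx ++ "." ++ PySem.Str.join "." (PySem.List.slice rest none (some n))
                   else pfx), PySem.List.slice rest (some n) none)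
      | none => tryLenB tokens ks
    else tryLenB tokens ks

def get_section_key_py_alt (keyword : String) (args : List String) : String × List String :=
  match tryLenB (keyword :: args) [2, 1] with
  | some r => r
  | none => ("", args)

-- ===== PRECONDITION & SPEC =====
def Spec_get_section_key_py (keyword : String) (args : List String) (out : String × List String) : Prop := out = get_section_key_py_alt keyword args
instance (keyword : String) (args : List String) (out : String × List String) : Decidable (Spec_get_section_key_py keyword args out) := by unfold Spec_get_section_key_py; infer_instance

-- ===== CLAIM (what is proved, stated in full; the proofs are below) =====
def Claim_equal_get_section_key_py : Prop := ∀ (keyword : String) (args : List String), Dom_get_section_key_py keyword args → Spec_get_section_key_py keyword args (get_section_key_py keyword args)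

-- ===== LEMMAS AND PROOFS =====

-- " ".join([s]) / "-".join([s]) is s
theorem join_singleton_str (sep s : String) : PySem.Str.join sep [s] = s := by
  simp [PySem.Str.join, PySem.Chars.join, List.intercalate]

-- " ".join([s, t]) is s ++ " " ++ t
theorem join_pair_str (s t : String) : PySem.Str.join " " [s, t] = s ++ " " ++ t := by
  apply String.toList_injective
  simp [PySem.Str.join, PySem.Chars.join, List.intercalate]

-- a space-joined pair is never a space-free key
theorem pair_ne_of_no_space (s t key : String) (h : ' ' ∉ key.toList) :
    s ++ " " ++ t ≠ key := by
  intro he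
  apply h
  rw [← he]
  simp

-- splitting "bridge group" at its only space
theorem split_bg (l1 l2 : List Char)
    (h : l1 ++ ' ' :: l2 = ['b','r','i','d','g','e',' ','g','r','o','u','p']) :
    l1 = ['b','r','i','d','g','e'] ∧ l2 = ['g','r','o','u','p'] := by
  rcases l1 with _|⟨c1,_|⟨c2,_|⟨c3,_|⟨c4,_|⟨c5,_|⟨c6,_|⟨c7,_|⟨c8,_|⟨c9,_|⟨c10,_|⟨c11,_|⟨c12,l1⟩⟩⟩⟩⟩⟩⟩⟩⟩⟩⟩⟩ <;> simp_all

-- the only way s ++ " " ++ t can be "bridge group"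
theorem pair_eq_bridge_group (s t : String) (h : s ++ " " ++ t = "bridge group") :
    s = "bridge" ∧ t = "group" := by
  have h2 : s.toList ++ ' ' :: t.toList = ['b','r','i','d','g','e',' ','g','r','o','u','p'] := by
    have := congrArg String.toList h
    simpa using this
  obtain ⟨ha, hb⟩ := split_bg _ _ h2
  exact ⟨String.toList_injective (by simpa using ha), String.toList_injective (by simpa using hb)⟩

-- a variable key absent from the literal dict looks up to none
theorem get_none (x : String) (h1 : x ≠ "router") (h2 : x ≠ "interface") (h3 : x ≠ "neighbor")
    (h4 : x ≠ "address-family") (h5 : x ≠ "vrf") (h6 : x ≠ "evi") (h7 : x ≠ "bridge-domain")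
    (h8 : x ≠ "bridge group") (h9 : x ≠ "route-policy") (h10 : x ≠ "policy-map")
    (h11 : x ≠ "dynamic-template") : sectionKeywords.get? x = none := by
  have hit : sectionKeywords.items = [("router", SpecV.num 2), ("interface", SpecV.num 1), ("neighbor", SpecV.num 1),
    ("address-family", SpecV.all), ("vrf", SpecV.num 1), ("evi", SpecV.num 1), ("bridge-domain", SpecV.num 1),
    ("bridge group", SpecV.num 1), ("route-policy", SpecV.num 1), ("policy-map", SpecV.num 1),
    ("dynamic-template", SpecV.all)] := by decide
  simp [PySem.Dict.get?, hit]
  exact ⟨fun h=>h1 h.symm, fun h=>h2 h.symm, fun h=>h3 h.symm, fun h=>h4 h.symm, fun h=>h5 h.symm, fun h=>h6 h.symm, fun h=>h7 h.symm, fun h=>h8 h.symm, fun h=>h9 h.symm, fun h=>h10 h.symm, fun h=>h11 h.symm⟩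

-- when no token prefix matches, B's lookup of the bare keyword agrees with A's plain branch
theorem plain_eq (keyword : String) (args : List String)
    (hA : twoWordLoopA keyword args twoWordSections = none)
    (hB : tryLenB (keyword :: args) [2, 1]
        = match sectionKeywords.get? keyword with
          | some spec =>
            match spec with
            | .all => some ((if args ≠ [] then keyword ++ "." ++ PySem.Str.join "-" args else keyword), [])
            | .num n =>
              some ((if PySem.List.slice args none (some n) ≠ [] then
                       keyword ++ "." ++ PySem.Str.join "." (PySem.List.slice args none (some n))
                     else keyword), PySem.List.slice args (some n) none)
          | none => none) :
    get_section_key_py keyword args = get_section_key_py_alt keyword args := by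
  unfold get_section_key_py get_section_key_py_alt
  rw [hA, hB]
  cases hs : sectionKeywords.get? keyword with
  | none => simp
  | some spec => cases spec <;> simp

theorem main_eq (keyword : String) (args : List String) :
    get_section_key_py keyword args = get_section_key_py_alt keyword args := by
  cases args with
  | nil =>
    apply plain_eq
    · simp [twoWordLoopA, twoWordSections]
    · simp only [tryLenB]
      norm_num
      simp [PySem.List.slice, join_singleton_str]
  | cons a0 tl =>
    by_cases hbg : keyword = "bridge" ∧ a0 = "group"
    · obtain ⟨hk, ha⟩ := hbg
      subst hk; subst ha
      have h2 : sectionKeywords.get? "bridge group" = some (.num 1) := by decide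
      have hj : PySem.Str.join " " ["bridge", "group"] = "bridge group" := by decide
      have hp : PySem.Str.join "-" ["bridge", "group"] = "bridge-group" := by decide
      have hr : PySem.Str.replace "bridge group" " " "-" = "bridge-group" := by decide
      have hsp : PySem.Str.split₀ "bridge group" = ["bridge", "group"] := by decide
      have hle : (2:Int) ≤ (tl.length : Int) + 1 + 1 := by omega
      simp [get_section_key_py, get_section_key_py_alt, twoWordLoopA, tryLenB, twoWordSections,
        h2, hj, hp, hr, hsp, hle, PySem.List.slice_to, PySem.List.slice_from]
    · have hx : PySem.Str.join " " (PySem.List.slice (keyword :: a0 :: tl) none (some (2:Int))) = keyword ++ " " ++ a0 := by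
        simp [PySem.List.slice_to, join_pair_str]
      have hnone : sectionKeywords.get? (keyword ++ " " ++ a0) = none := by
        by_cases hb : keyword ++ " " ++ a0 = "bridge group"
        · exact absurd (pair_eq_bridge_group _ _ hb) hbg
        · exact get_none _ (pair_ne_of_no_space _ _ _ (by decide)) (pair_ne_of_no_space _ _ _ (by decide))
            (pair_ne_of_no_space _ _ _ (by decide)) (pair_ne_of_no_space _ _ _ (by decide))
            (pair_ne_of_no_space _ _ _ (by decide)) (pair_ne_of_no_space _ _ _ (by decide))
            (pair_ne_of_no_space _ _ _ (by decide)) hb (pair_ne_of_no_space _ _ _ (by decide))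
            (pair_ne_of_no_space _ _ _ (by decide)) (pair_ne_of_no_space _ _ _ (by decide))
      apply plain_eq
      · have hsp : PySem.Str.split₀ "bridge group" = ["bridge", "group"] := by decide
        simp only [twoWordLoopA, twoWordSections, hsp]
        rw [if_neg]
        intro hc
        exact hbg ⟨hc.1, by simpa using hc.2.2⟩
      · simp only [tryLenB, List.length_cons]
        rw [if_pos (by push_cast; omega)]
        rw [hx, hnone]
        simp [PySem.List.slice_to, PySem.List.slice_from, join_singleton_str]
        intro hcon
        exact absurd hcon (by omega)

-- ===== VERDICT (by name: the statement is the Claim_ definition above) =====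
theorem get_section_key_py_spec : Claim_equal_get_section_key_py := by
  intro keyword args _
  unfold Spec_get_section_key_py
  exact main_eq keyword args
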